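-- pv_equiv track=rewrite | github.com/ChengTsungPao/LeetCode | 1580_Put_Boxes_Into_the_Warehouse_II/code1.py | maxBoxesInWarehouse
-- ===== SOURCE A (Python) =====
-- from typing import List
--
-- def maxBoxesInWarehouse(boxes: List[int], warehouse: List[int]) -> int:
--
--     n = len(warehouse)
--
--     prefixMin = [float("inf")] * n
--     suffixMin = [float("inf")] * n
--
--     prefixMin[ 0] = warehouse[ 0]
--     suffixMin[-1] = warehouse[-1]
--
--     minIndex = 0
--
--     for i in range(1, n):
--         prefixMin[ i] = min(prefixMin[ i - 1], warehouse[ i])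
--         suffixMin[~i] = min(suffixMin[~i + 1], warehouse[~i])
--
--         if prefixMin[i - 1] > warehouse[i]:
--             minIndex = i
--
--     ans = 0
--     i = minIndex
--     j = i + 1
--     for box in sorted(boxes):
--
--         while i >= 0 and box > prefixMin[i]:
--             i -= 1
--         while j < n and box > suffixMin[j]:
--             j += 1
--
--         _min, isLeft = float("inf"), None
--         if i >= 0:
--             _min, isLeft = min((_min, isLeft), (prefixMin[i], True))
--         if j < n:
--             _min, isLeft = min((_min, isLeft), (suffixMin[j], False))
--
--         if isLeft == None:
--             break
--
--         ans += 1
--         if isLeft: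
--             i -= 1
--         else:
--             j += 1
--
--     return ans
-- ===== SOURCE B (Python) =====
-- def maxBoxesInWarehouse(boxes, warehouse):
--     leftMin = []
--     cur = warehouse[0]
--     for h in warehouse:
--         cur = min(cur, h)
--         leftMin.append(cur)
--     rightMin = []
--     cur = warehouse[-1]
--     for h in reversed(warehouse):
--         cur = min(cur, h)
--         rightMin.append(cur)
--     rightMin.reverse()
--     effective = sorted(max(a, b) for a, b in zip(leftMin, rightMin))
--     sboxes = sorted(boxes)
--     count = 0
--     for h in effective:
--         if count < len(sboxes) and sboxes[count] <= h:
--             count += 1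
--     return count
-- ===== Notes on version B (the rewrite author's own statement) =====
-- stated objective: simpler
-- what changed: Replaces A's dual two-pointer walk over prefix/suffix minima (with tuple-min sentinel tricks and a tracked argmin index) by the standard effective-height greedy: effective[i] = max(prefixMin[i], suffixMin[i]), sort it together with the boxes, and walk once with a single box pointer.
import Mathlib
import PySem

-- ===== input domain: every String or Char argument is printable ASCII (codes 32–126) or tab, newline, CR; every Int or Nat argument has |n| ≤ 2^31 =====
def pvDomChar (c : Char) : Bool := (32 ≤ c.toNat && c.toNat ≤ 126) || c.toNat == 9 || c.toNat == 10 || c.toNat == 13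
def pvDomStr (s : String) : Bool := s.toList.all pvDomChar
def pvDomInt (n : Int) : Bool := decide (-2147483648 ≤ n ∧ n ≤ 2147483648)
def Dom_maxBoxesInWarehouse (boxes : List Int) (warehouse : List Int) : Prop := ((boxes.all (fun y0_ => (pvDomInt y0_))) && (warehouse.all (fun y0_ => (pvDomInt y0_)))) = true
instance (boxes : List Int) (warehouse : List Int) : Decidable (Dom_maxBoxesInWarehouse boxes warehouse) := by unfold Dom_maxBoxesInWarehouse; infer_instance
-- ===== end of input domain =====

-- B replaces A's dual two-pointer walk over prefix/suffix minima by the standard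
-- effective-height greedy (sort max(prefixMin,suffixMin) and walk once with a box pointer);
-- same results, simpler code. Both raise IndexError on an empty warehouse (excluded by Pre_).

-- ===== PORT A =====
-- A's prefix/suffix arrays start as float("inf") cells: modelled as `Option Int`, `none` = inf.
def infMin (a : Option Int) (b : Int) : Int :=
  match a with
  | none => b
  | some x => min x b

-- Python `a > b` where a may be float("inf")
def infGt (a : Option Int) (b : Int) : Bool :=
  match a with
  | none => true
  | some x => decide (b < x)

-- Python `b > a` where a may be float("inf")
def gtInf (b : Int) (a : Option Int) : Bool :=
  match a with
  | none => false
  | some x => decide (x < b)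

-- Python tuple-min min((v1,t1),(v2,t2)) with none = float("inf") / None, False < True.
-- (A None-vs-bool second-component comparison would be a Python TypeError; it is unreachable
-- in A because the first components are then distinct, so the default branch covers it.)
def fstLt : Option Int → Option Int → Bool
  | none, _ => false
  | some _, none => true
  | some x, some y => decide (x < y)

def sndLt : Option Bool → Option Bool → Bool
  | some false, some true => true
  | _, _ => false

def pyTupMin (a b : Option Int × Option Bool) : Option Int × Option Bool :=
  if fstLt b.1 a.1 then b else if b.1 = a.1 ∧ sndLt b.2 a.2 then b else a

-- body of A's build loop `for i in range(1, n)`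
def buildStep (warehouse : List Int) (st : List (Option Int) × List (Option Int) × Int) (i : Int) :
    List (Option Int) × List (Option Int) × Int :=
  let prefixMin := PySem.List.pySetD st.1 i
    (some (infMin (PySem.List.pyGetD st.1 (i - 1) none) (PySem.List.pyGetD warehouse i 0)))
  let suffixMin := PySem.List.pySetD st.2.1 (-(i + 1))
    (some (infMin (PySem.List.pyGetD st.2.1 (-i) none) (PySem.List.pyGetD warehouse (-(i + 1)) 0)))
  let minIndex := if infGt (PySem.List.pyGetD prefixMin (i - 1) none) (PySem.List.pyGetD warehouse i 0) then i else st.2.2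
  (prefixMin, suffixMin, minIndex)

-- `while i >= 0 and box > prefixMin[i]: i -= 1`
def skipL (P : List (Option Int)) (box : Int) (i : Int) : Int :=
  if h : 0 ≤ i ∧ gtInf box (PySem.List.pyGetD P i none) then skipL P box (i - 1) else i
termination_by (i + 1).toNat
decreasing_by omega

-- `while j < n and box > suffixMin[j]: j += 1`
def skipR (S : List (Option Int)) (n : Int) (box : Int) (j : Int) : Int :=
  if h : j < n ∧ gtInf box (PySem.List.pyGetD S j none) then skipR S n box (j + 1) else j
termination_by (n - j).toNat
decreasing_by omega

-- `for box in sorted(boxes): ...` with break; args: boxes left, ans, i, j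
def loopA (P S : List (Option Int)) (n : Int) : List Int → Int → Int → Int → Int
  | [], ans, _, _ => ans
  | box :: bs, ans, i, j =>
    let i' := skipL P box i
    let j' := skipR S n box j
    let t0 : Option Int × Option Bool := (none, none)
    let t1 := if 0 ≤ i' then pyTupMin t0 (PySem.List.pyGetD P i' none, some true) else t0
    let t2 := if j' < n then pyTupMin t1 (PySem.List.pyGetD S j' none, some false) else t1
    match t2.2 with
    | none => ans
    | some true => loopA P S n bs (ans + 1) (i' - 1) j'
    | some false => loopA P S n bs (ans + 1) i' (j' + 1)

def maxBoxesInWarehouse (boxes : List Int) (warehouse : List Int) : Int :=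
  let n : Int := (warehouse.length : Int)
  -- prefixMin[0] = warehouse[0]; suffixMin[-1] = warehouse[-1] (IndexError on [] — excluded by Pre_)
  let prefixMin1 := PySem.List.pySetD (List.replicate warehouse.length (none : Option Int)) 0
    (some (PySem.List.pyGetD warehouse 0 0))
  let suffixMin1 := PySem.List.pySetD (List.replicate warehouse.length (none : Option Int)) (-1)
    (some (PySem.List.pyGetD warehouse (-1) 0))
  let st := (PySem.List.pyRange 1 n 1).foldl (buildStep warehouse) (prefixMin1, suffixMin1, (0 : Int))
  loopA st.1 st.2.1 n (PySem.List.sorted boxes (fun x => x) false) 0 st.2.2 (st.2.2 + 1)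

-- ===== PORT B =====
-- `cur = min(cur, h); acc.append(cur)`
def scanStep (s : Int × List Int) (h : Int) : Int × List Int :=
  (min s.1 h, s.2 ++ [min s.1 h])

-- `if count < len(sboxes) and sboxes[count] <= h: count += 1`
def countStep (sboxes : List Int) (count : Int) (h : Int) : Int :=
  if count < (sboxes.length : Int) ∧ PySem.List.pyGetD sboxes count 0 ≤ h then count + 1 else count

def maxBoxesInWarehouse_alt (boxes : List Int) (warehouse : List Int) : Int :=
  -- cur = warehouse[0] / warehouse[-1] (IndexError on [] — excluded by Pre_)
  let leftMin := (warehouse.foldl scanStep (PySem.List.pyGetD warehouse 0 0, [])).2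
  let rightMin := (warehouse.reverse.foldl scanStep (PySem.List.pyGetD warehouse (-1) 0, [])).2.reverse
  let effective := PySem.List.sorted (List.zipWith max leftMin rightMin) (fun x => x) false
  let sboxes := PySem.List.sorted boxes (fun x => x) false
  effective.foldl (countStep sboxes) 0

-- ===== PRECONDITION & SPEC =====
-- Pre_ excludes only the empty warehouse, on which A (warehouse[0]) raises IndexError (B raises too).
def Pre_maxBoxesInWarehouse (boxes : List Int) (warehouse : List Int) : Prop := warehouse ≠ []
instance (boxes : List Int) (warehouse : List Int) : Decidable (Pre_maxBoxesInWarehouse boxes warehouse) := by unfold Pre_maxBoxesInWarehouse; infer_instance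

def pvWitness_maxBoxesInWarehouse : List Int × List Int := ([1, 2, 4], [3, 1, 2])

def Spec_maxBoxesInWarehouse (boxes : List Int) (warehouse : List Int) (out : Int) : Prop := out = maxBoxesInWarehouse_alt boxes warehouse
instance (boxes : List Int) (warehouse : List Int) (out : Int) : Decidable (Spec_maxBoxesInWarehouse boxes warehouse out) := by unfold Spec_maxBoxesInWarehouse; infer_instance

-- ===== CLAIM (what is proved, stated in full; the proofs are below) =====
def Claim_equal_maxBoxesInWarehouse : Prop := ∀ (boxes : List Int) (warehouse : List Int), Dom_maxBoxesInWarehouse boxes warehouse → Pre_maxBoxesInWarehouse boxes warehouse → Spec_maxBoxesInWarehouse boxes warehouse (maxBoxesInWarehouse boxes warehouse)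

-- ===== LEMMAS AND PROOFS =====

-- running prefix minima (cur seeded with c)
def scanMin (c : Int) : List Int → List Int
  | [] => []
  | h :: t => min c h :: scanMin (min c h) t

-- suffix minima
def sufMin : List Int → List Int
  | [] => []
  | [h] => [h]
  | h :: h2 :: t => min h ((sufMin (h2 :: t)).headD 0) :: sufMin (h2 :: t)

def prefMin (W : List Int) : List Int := scanMin (W.headD 0) W

-- merge of the two ascending height streams, ties taken from the right (as A's tuple-min does)
def mergeLR : List Int → List Int → List Int
  | [], R => R
  | x :: L, [] => x :: L
  | x :: L, y :: R => if y ≤ x then y :: mergeLR (x :: L) R else x :: mergeLR L (y :: R)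
termination_by L R => L.length + R.length

-- greedy: for each sorted box, drop too-low heights from both streams, take the lower head
def twoGreedy : List Int → List Int → List Int → Int
  | [], _, _ => 0
  | b :: bs, L, R =>
    match L.dropWhile (fun x => decide (x < b)), R.dropWhile (fun x => decide (x < b)) with
    | [], [] => 0
    | _ :: L', [] => 1 + twoGreedy bs L' []
    | [], _ :: R' => 1 + twoGreedy bs [] R'
    | x :: L', y :: R' => if y ≤ x then 1 + twoGreedy bs (x :: L') R' else 1 + twoGreedy bs L' (y :: R')

-- greedy over one merged ascending height list
def oneGreedy : List Int → List Int → Int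
  | _, [] => 0
  | [], _ :: _ => 0
  | b :: bs, e :: es => if b ≤ e then 1 + oneGreedy bs es else oneGreedy (b :: bs) es
termination_by bs es => es.length

-- ---- basic facts about the scans ----

lemma length_scanMin (c : Int) (l : List Int) : (scanMin c l).length = l.length := by
  induction l generalizing c with
  | nil => rfl
  | cons h t ih => simp [scanMin, ih]

lemma length_prefMin (W : List Int) : (prefMin W).length = W.length := length_scanMin _ _

lemma length_sufMin (l : List Int) : (sufMin l).length = l.length := by
  induction l with
  | nil => rfl
  | cons h t ih =>
    cases t with
    | nil => rfl
    | cons h2 t2 => simp [sufMin] at ih ⊢; omega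

lemma scanMin_mem_le (c : Int) (l : List Int) : ∀ z ∈ scanMin c l, z ≤ c := by
  induction l generalizing c with
  | nil => simp [scanMin]
  | cons h t ih =>
    intro z hz
    simp only [scanMin, List.mem_cons] at hz
    rcases hz with rfl | hz
    · exact min_le_left _ _
    · exact le_trans (ih _ _ hz) (min_le_left _ _)

lemma scanMin_pairwise (c : Int) (l : List Int) : (scanMin c l).Pairwise (fun a b => b ≤ a) := by
  induction l generalizing c with
  | nil => simp [scanMin]
  | cons h t ih =>
    simp only [scanMin, List.pairwise_cons]
    exact ⟨fun z hz => scanMin_mem_le _ _ z hz, ih _⟩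

lemma scanMin_getD_succ (c : Int) (l : List Int) (k : Nat) (h : k + 1 < l.length) :
    (scanMin c l).getD (k+1) 0 = min ((scanMin c l).getD k 0) (l.getD (k+1) 0) := by
  induction l generalizing c k with
  | nil => simp at h
  | cons a t ih =>
    cases k with
    | zero =>
      cases t with
      | nil => simp at h
      | cons b t2 => simp [scanMin, min_assoc]
    | succ k =>
      simp only [List.length_cons] at h
      simpa [scanMin] using ih (min c a) k (by omega)

lemma scanMin_getD_le (c : Int) (l : List Int) (k : Nat) (h : k < l.length) :
    (scanMin c l).getD k 0 ≤ l.getD k 0 := by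
  induction l generalizing c k with
  | nil => simp at h
  | cons a t ih =>
    cases k with
    | zero => simp [scanMin]
    | succ k =>
      simp only [List.length_cons] at h
      simpa [scanMin] using ih (min c a) k (by omega)

lemma scanMin_append_singleton (c x : Int) (l : List Int) :
    scanMin c (l ++ [x]) = scanMin c l ++ [min ((scanMin c l).getLastD c) x] := by
  induction l generalizing c with
  | nil => simp [scanMin]
  | cons a t ih =>
    simp only [List.cons_append, scanMin, ih (min c a), List.cons_append]
    congr 2
    cases hsm : scanMin (min c a) t with
    | nil =>
      have := length_scanMin (min c a) t
      rw [hsm] at this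
      have ht : t = [] := by cases t <;> simp_all
      subst ht; simp
    | cons w ws =>
      have h1 : (w :: ws).getLast?.isSome := by simp
      obtain ⟨v, hv⟩ := Option.isSome_iff_exists.mp h1
      simp [hv]

lemma foldl_scanStep (l : List Int) (c : Int) (acc : List Int) :
    (l.foldl scanStep (c, acc)).2 = acc ++ scanMin c l := by
  induction l generalizing c acc with
  | nil => simp [scanMin]
  | cons h t ih => simp [scanStep, scanMin, ih]

-- pairwise monotonicity, getD form
lemma pairwise_getD_mono {r : Int → Int → Prop} (l : List Int) (hp : l.Pairwise r)
    (i j : Nat) (hij : i < j) (hj : j < l.length) : r (l.getD i 0) (l.getD j 0) := by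
  rw [List.getD_eq_getElem l 0 (by omega), List.getD_eq_getElem l 0 hj]
  exact List.pairwise_iff_getElem.1 hp i j (by omega) hj hij

lemma prefMin_anti (W : List Int) (i j : Nat) (hij : i ≤ j) (hj : j < W.length) :
    (prefMin W).getD j 0 ≤ (prefMin W).getD i 0 := by
  rcases Nat.eq_or_lt_of_le hij with rfl | h
  · exact le_refl _
  · exact pairwise_getD_mono _ (scanMin_pairwise _ _) i j h (by rw [length_scanMin]; omega)

lemma prefMin_le_self (W : List Int) (k : Nat) (h : k < W.length) :
    (prefMin W).getD k 0 ≤ W.getD k 0 := scanMin_getD_le _ _ _ h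

lemma prefMin_getD_zero (W : List Int) (h : W ≠ []) : (prefMin W).getD 0 0 = W.getD 0 0 := by
  cases W with
  | nil => simp at h
  | cons a t => simp [prefMin, scanMin]

lemma prefMin_getD_succ (W : List Int) (k : Nat) (h : k + 1 < W.length) :
    (prefMin W).getD (k+1) 0 = min ((prefMin W).getD k 0) (W.getD (k+1) 0) :=
  scanMin_getD_succ _ _ _ h

-- sufMin facts
lemma sufMin_headD (h h2 : Int) (t : List Int) :
    sufMin (h :: h2 :: t) = min h ((sufMin (h2 :: t)).headD 0) :: sufMin (h2 :: t) := rfl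

lemma sufMin_getD_succ (l : List Int) (k : Nat) (h : k + 1 < l.length) :
    (sufMin l).getD k 0 = min (l.getD k 0) ((sufMin l).getD (k+1) 0) := by
  induction l generalizing k with
  | nil => simp at h
  | cons a t ih =>
    cases t with
    | nil => simp at h
    | cons b t2 =>
      cases k with
      | zero =>
        rw [sufMin_headD]
        have hne : sufMin (b :: t2) ≠ [] := by
          have := length_sufMin (b :: t2); intro hc; rw [hc] at this; simp at this
        cases hsm : sufMin (b :: t2) with
        | nil => exact absurd hsm hne
        | cons w ws => simp [hsm]
      | succ k =>
        simp only [List.length_cons] at h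
        simpa [sufMin] using ih k (by simpa using h)

lemma sufMin_getD_last (l : List Int) (h : l ≠ []) :
    (sufMin l).getD (l.length - 1) 0 = l.getD (l.length - 1) 0 := by
  induction l with
  | nil => simp at h
  | cons a t ih =>
    cases t with
    | nil => simp [sufMin]
    | cons b t2 =>
      have := ih (by simp)
      simpa [sufMin] using this

lemma sufMin_le_self (l : List Int) (k : Nat) (h : k < l.length) :
    (sufMin l).getD k 0 ≤ l.getD k 0 := by
  rcases Nat.lt_or_ge (k+1) l.length with h1 | h1
  · rw [sufMin_getD_succ l k h1]; exact min_le_left _ _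
  · have : k = l.length - 1 := by omega
    subst this
    rw [sufMin_getD_last l (by intro hc; subst hc; simp at h)]

lemma sufMin_pairwise (l : List Int) : (sufMin l).Pairwise (fun a b => a ≤ b) := by
  induction l with
  | nil => simp [sufMin]
  | cons a t ih =>
    cases t with
    | nil => simp [sufMin]
    | cons b t2 =>
      rw [sufMin_headD]
      refine List.pairwise_cons.2 ⟨?_, ih⟩
      intro z hz
      have hne : sufMin (b :: t2) ≠ [] := by
        have := length_sufMin (b :: t2); intro hc; rw [hc] at this; simp at this
      have hhead : (sufMin (b :: t2)).headD 0 ≤ z := by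
        cases hsm : sufMin (b :: t2) with
        | nil => exact absurd hsm hne
        | cons w ws =>
          rw [hsm] at hz ih
          rcases List.mem_cons.1 hz with rfl | hz2
          · simp
          · simpa using (List.pairwise_cons.1 ih).1 z hz2
      exact le_trans (min_le_right _ _) hhead

lemma sufMin_mono (l : List Int) (i j : Nat) (hij : i ≤ j) (hj : j < l.length) :
    (sufMin l).getD i 0 ≤ (sufMin l).getD j 0 := by
  rcases Nat.eq_or_lt_of_le hij with rfl | h
  · exact le_refl _
  · exact pairwise_getD_mono _ (sufMin_pairwise _) i j h (by rw [length_sufMin]; omega)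

lemma sufMin_lb (l : List Int) (x : Int) (hx : ∀ y ∈ l, x ≤ y) :
    ∀ z ∈ sufMin l, x ≤ z := by
  induction l with
  | nil => simp [sufMin]
  | cons a t ih =>
    cases t with
    | nil =>
      intro z hz
      have hz' : z = a := by simpa [sufMin] using hz
      subst hz'; exact hx z (by simp)
    | cons b t2 =>
      intro z hz
      rw [sufMin_headD] at hz
      rcases List.mem_cons.1 hz with rfl | hz2
      · have ha : x ≤ a := hx a (by simp)
        have hne : sufMin (b :: t2) ≠ [] := by
          have := length_sufMin (b :: t2); intro hc; rw [hc] at this; simp at this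
        have : x ≤ (sufMin (b :: t2)).headD 0 := by
          cases hsm : sufMin (b :: t2) with
          | nil => exact absurd hsm hne
          | cons w ws =>
            have : w ∈ sufMin (b :: t2) := by rw [hsm]; simp
            simpa [hsm] using ih (fun y hy => hx y (by simp [List.mem_cons] at hy ⊢; tauto)) w this
        exact le_min ha this
      · exact ih (fun y hy => hx y (by simp [List.mem_cons] at hy ⊢; tauto)) z hz2

lemma reverse_scanMin_reverse (W : List Int) :
    (scanMin (W.reverse.headD 0) W.reverse).reverse = sufMin W := by
  induction W with
  | nil => rfl
  | cons h t ih =>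
    cases t with
    | nil => simp [scanMin, sufMin]
    | cons h2 t2 =>
      have hne : (h2 :: t2).reverse ≠ [] := by simp
      have hhead : ((h :: h2 :: t2).reverse).headD 0 = ((h2 :: t2).reverse).headD 0 := by
        cases hr : (h2 :: t2).reverse with
        | nil => exact absurd hr hne
        | cons w ws => simp [List.reverse_cons, hr]
      have hrw : (h :: h2 :: t2).reverse = (h2 :: t2).reverse ++ [h] := by simp
      rw [hrw] at hhead ⊢
      rw [hhead, scanMin_append_singleton]
      obtain ⟨w, ws, hsm⟩ : ∃ w ws, sufMin (h2 :: t2) = w :: ws := by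
        have hl := length_sufMin (h2 :: t2)
        cases hs : sufMin (h2 :: t2) with
        | nil => rw [hs] at hl; simp at hl
        | cons w ws => exact ⟨w, ws, rfl⟩
      have hscan : scanMin (((h2 :: t2).reverse).headD 0) (h2 :: t2).reverse = (w :: ws).reverse := by
        rw [← hsm, ← ih, List.reverse_reverse]
      rw [List.reverse_append, hscan, sufMin_headD, hsm]
      simp [min_comm]

-- ---- merged-stream greedy vs single-list greedy ----

lemma mergeLR_nil_left (R : List Int) : mergeLR [] R = R := by rw [mergeLR.eq_def]

lemma mergeLR_cons_nil (x : Int) (L : List Int) : mergeLR (x :: L) [] = x :: L := by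
  rw [mergeLR.eq_def]

lemma mergeLR_cons_cons (x y : Int) (L R : List Int) :
    mergeLR (x :: L) (y :: R) =
      if y ≤ x then y :: mergeLR (x :: L) R else x :: mergeLR L (y :: R) := by
  rw [mergeLR.eq_def]

lemma mergeLR_nil_right (L : List Int) : mergeLR L [] = L := by
  cases L
  · exact mergeLR_nil_left []
  · exact mergeLR_cons_nil _ _

lemma oneGreedy_nil_right (bs : List Int) : oneGreedy bs [] = 0 := by
  cases bs <;> rw [oneGreedy.eq_def]

lemma oneGreedy_cons_cons (b e : Int) (bs es : List Int) :
    oneGreedy (b :: bs) (e :: es) =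
      if b ≤ e then 1 + oneGreedy bs es else oneGreedy (b :: bs) es := by
  rw [oneGreedy.eq_def]

lemma dropWhile_ne_head (p : Int → Bool) (x : Int) (l xs : List Int)
    (h : l.dropWhile p = x :: xs) : p x = false := by
  have h2 : l.dropWhile p ≠ [] := by rw [h]; simp
  have h3 := List.head_dropWhile_not p h2
  have h4 : (l.dropWhile p).head h2 = x := by simp [h]
  rwa [h4] at h3

lemma mergeLR_perm (L R : List Int) : (mergeLR L R).Perm (L ++ R) := by
  fun_induction mergeLR L R with
  | case1 R => simp
  | case2 x L => simp
  | case3 x L y R hle ih => exact (ih.cons y).trans List.perm_middle.symm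
  | case4 x L y R hle ih => simpa using ih.cons x

lemma mem_mergeLR (L R : List Int) (z : Int) : z ∈ mergeLR L R ↔ z ∈ L ∨ z ∈ R := by
  rw [(mergeLR_perm L R).mem_iff]; simp

lemma mergeLR_pairwise (L R : List Int) (hL : L.Pairwise (· ≤ ·)) (hR : R.Pairwise (· ≤ ·)) :
    (mergeLR L R).Pairwise (· ≤ ·) := by
  fun_induction mergeLR L R with
  | case1 R => exact hR
  | case2 x L => exact hL
  | case3 x L y R hle ih =>
    obtain ⟨hy, hR'⟩ := List.pairwise_cons.1 hR
    refine List.pairwise_cons.2 ⟨?_, ih hL hR'⟩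
    intro z hz
    rcases (mem_mergeLR _ _ _).1 hz with hz | hz
    · rcases List.mem_cons.1 hz with rfl | hz2
      · exact hle
      · exact le_trans hle ((List.pairwise_cons.1 hL).1 z hz2)
    · exact hy z hz
  | case4 x L y R hle ih =>
    obtain ⟨hx, hL'⟩ := List.pairwise_cons.1 hL
    refine List.pairwise_cons.2 ⟨?_, ih hL' hR⟩
    intro z hz
    rcases (mem_mergeLR _ _ _).1 hz with hz | hz
    · exact hx z hz
    · rcases List.mem_cons.1 hz with rfl | hz2
      · omega
      · exact le_trans (by omega) ((List.pairwise_cons.1 hR).1 z hz2)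

lemma dropWhile_mergeLR (b : Int) (L R : List Int) :
    (mergeLR L R).dropWhile (fun x => decide (x < b)) =
      mergeLR (L.dropWhile (fun x => decide (x < b))) (R.dropWhile (fun x => decide (x < b))) := by
  fun_induction mergeLR L R with
  | case1 R => simp [mergeLR_nil_left]
  | case2 x L => rw [List.dropWhile_nil, mergeLR_nil_right]
  | case3 x L y R hle ih =>
    by_cases hyb : y < b
    · rw [List.dropWhile_cons_of_pos (l := mergeLR (x :: L) R) (by simpa using hyb), ih,
        List.dropWhile_cons_of_pos (l := R) (p := fun x => decide (x < b)) (by simpa using hyb)]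
    · have hxb : ¬ x < b := by omega
      rw [List.dropWhile_cons_of_neg (l := mergeLR (x :: L) R) (by simpa using hyb),
        List.dropWhile_cons_of_neg (l := L) (p := fun x => decide (x < b)) (by simpa using hxb),
        List.dropWhile_cons_of_neg (l := R) (p := fun x => decide (x < b)) (by simpa using hyb),
        mergeLR_cons_cons, if_pos hle]
  | case4 x L y R hle ih =>
    by_cases hxb : x < b
    · rw [List.dropWhile_cons_of_pos (l := mergeLR L (y :: R)) (by simpa using hxb), ih,
        List.dropWhile_cons_of_pos (l := L) (p := fun x => decide (x < b)) (by simpa using hxb)]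
    · have hyb : ¬ y < b := by omega
      rw [List.dropWhile_cons_of_neg (l := mergeLR L (y :: R)) (by simpa using hxb),
        List.dropWhile_cons_of_neg (l := L) (p := fun x => decide (x < b)) (by simpa using hxb),
        List.dropWhile_cons_of_neg (l := R) (p := fun x => decide (x < b)) (by simpa using hyb),
        mergeLR_cons_cons, if_neg hle]

lemma oneGreedy_dropWhile (b : Int) (bs E : List Int) :
    oneGreedy (b :: bs) E = oneGreedy (b :: bs) (E.dropWhile (fun e => decide (e < b))) := by
  induction E with
  | nil => simp
  | cons e es ih =>
    by_cases heb : e < b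
    · rw [List.dropWhile_cons_of_pos (by simpa using heb), ← ih,
        oneGreedy_cons_cons, if_neg (by omega)]
    · rw [List.dropWhile_cons_of_neg (by simpa using heb)]

lemma oneGreedy_nil_left (e : Int) (es : List Int) : oneGreedy [] (e :: es) = 0 := by
  rw [oneGreedy.eq_def]

lemma oneGreedy_nil (E : List Int) : oneGreedy [] E = 0 := by
  cases E with
  | nil => rw [oneGreedy_nil_right]
  | cons e es => rw [oneGreedy_nil_left]

lemma twoGreedy_eq_oneGreedy (bs L R : List Int) :
    twoGreedy bs L R = oneGreedy bs (mergeLR L R) := by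
  induction bs generalizing L R with
  | nil => rw [twoGreedy, oneGreedy_nil]
  | cons b bs ih =>
    rw [oneGreedy_dropWhile, dropWhile_mergeLR]
    cases hL : L.dropWhile (fun x => decide (x < b)) with
    | nil =>
      cases hR : R.dropWhile (fun x => decide (x < b)) with
      | nil =>
        rw [twoGreedy, hL, hR, mergeLR_nil_left, oneGreedy_nil_right]
      | cons y R' =>
        have hy : b ≤ y := by
          have := dropWhile_ne_head _ _ _ _ hR; simp at this; omega
        rw [twoGreedy, hL, hR]
        show 1 + twoGreedy bs [] R' = _
        rw [mergeLR_nil_left, oneGreedy_cons_cons, if_pos hy, ih, mergeLR_nil_left]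
    | cons x L' =>
      have hx : b ≤ x := by
        have := dropWhile_ne_head _ _ _ _ hL; simp at this; omega
      cases hR : R.dropWhile (fun x => decide (x < b)) with
      | nil =>
        rw [twoGreedy, hL, hR]
        show 1 + twoGreedy bs L' [] = _
        rw [mergeLR_cons_nil, oneGreedy_cons_cons, if_pos hx, ih, mergeLR_nil_right]
      | cons y R' =>
        have hy : b ≤ y := by
          have := dropWhile_ne_head _ _ _ _ hR; simp at this; omega
        rw [twoGreedy, hL, hR]
        show (if y ≤ x then 1 + twoGreedy bs (x :: L') R' else 1 + twoGreedy bs L' (y :: R')) = _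
        rw [mergeLR_cons_cons]
        by_cases hyx : y ≤ x
        · rw [if_pos hyx, if_pos hyx, oneGreedy_cons_cons, if_pos hy, ih]
        · rw [if_neg hyx, if_neg hyx, oneGreedy_cons_cons, if_pos hx, ih]

lemma foldl_countStep (sb E : List Int) (c : Int) (hc : 0 ≤ c) (hcl : c ≤ (sb.length : Int)) :
    E.foldl (countStep sb) c = c + oneGreedy (sb.drop c.toNat) E := by
  induction E generalizing c with
  | nil => rw [List.foldl_nil, oneGreedy_nil_right]; omega
  | cons e es ih =>
    rw [List.foldl_cons]
    by_cases hlt : c < (sb.length : Int)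
    · have hget : PySem.List.pyGetD sb c 0 = sb.getD c.toNat 0 := by
        rw [PySem.List.pyGetD_eq_getElem sb (0:Int) hc (by omega), List.getD_eq_getElem sb 0 (by omega)]
      have hdrop : sb.drop c.toNat = sb.getD c.toNat 0 :: sb.drop (c.toNat + 1) := by
        rw [List.getD_eq_getElem sb 0 (by omega)]
        exact List.drop_eq_getElem_cons (by omega)
      rw [hdrop, oneGreedy_cons_cons]
      by_cases hfit : sb.getD c.toNat 0 ≤ e
      · have h1 : countStep sb c e = c + 1 := by rw [countStep, hget, if_pos ⟨hlt, hfit⟩]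
        have h2 : (c + 1).toNat = c.toNat + 1 := by omega
        have hrec := ih (c + 1) (by omega) (by omega)
        rw [h1, hrec, h2, if_pos hfit]
        omega
      · have h1 : countStep sb c e = c := by rw [countStep, hget]; exact if_neg (by tauto)
        rw [h1, ih c hc hcl, hdrop, if_neg hfit]
    · have hdrop : sb.drop c.toNat = [] := List.drop_eq_nil_of_le (by omega)
      have h1 : countStep sb c e = c := by rw [countStep]; exact if_neg (by omega)
      rw [h1, ih c hc hcl, hdrop, oneGreedy_nil, oneGreedy_nil]

-- ---- A's build loop produces the prefix/suffix minima and a usable argmin index ----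

lemma replicate_set_last {α : Type} (k : Nat) (a v : α) :
    (List.replicate (k + 1) a).set k v = List.replicate k a ++ [v] := by
  induction k with
  | zero => simp
  | succ k ih => rw [List.replicate_succ, List.set_cons_succ, ih, List.replicate_succ, List.cons_append]

lemma pySetD_neg {α : Type} (xs : List α) (k : Nat) (v : α) (h1 : 0 < k) (h2 : k ≤ xs.length) :
    PySem.List.pySetD xs (-(k : Int)) v = xs.set (xs.length - k) v := by
  have hneg : ¬ (0 : Int) ≤ -(k : Int) ∨ k = 0 := by omega
  rcases hneg with hneg | rfl
  · simp only [PySem.List.pySetD, PySem.List.pySet?, PySem.List.pyIdx?]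
    rw [if_neg (by omega), if_pos (by omega)]
    simp only [Option.map_some, Option.getD_some]
    congr 1
    omega
  · omega

lemma pyGetD_mapsome_take (MPl : List Int) (B : List (Option Int)) (t k : Nat)
    (hk : k < t) (ht : t ≤ MPl.length) :
    PySem.List.pyGetD ((MPl.take t).map some ++ B) ((k : Nat) : Int) none
      = some (MPl.getD k 0) := by
  have hlen : ((MPl.take t).map some).length = t := by simp; omega
  rw [PySem.List.pyGetD_eq_getElem _ _ (by omega) (by simp <;> omega)]
  rw [List.getElem_append_left (by omega)]
  simp only [Int.toNat_natCast, List.getElem_map, List.getElem_take]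
  rw [List.getD_eq_getElem MPl 0 (by omega)]

lemma build_inv (W : List Int) (hW : W ≠ []) (t : Nat) (h1 : 1 ≤ t) (h2 : t ≤ W.length) :
    ∃ m : Int,
      (PySem.List.pyRange 1 (t : Int) 1).foldl (buildStep W)
        (PySem.List.pySetD (List.replicate W.length (none : Option Int)) 0 (some (PySem.List.pyGetD W 0 0)),
         PySem.List.pySetD (List.replicate W.length (none : Option Int)) (-1) (some (PySem.List.pyGetD W (-1) 0)),
         (0 : Int))
      = (((prefMin W).take t).map some ++ List.replicate (W.length - t) none,
         List.replicate (W.length - t) none ++ ((sufMin W).drop (W.length - t)).map some,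
         m)
      ∧ 0 ≤ m ∧ m.toNat < t
      ∧ (prefMin W).getD m.toNat 0 = W.getD m.toNat 0
      ∧ (∀ s : Nat, m.toNat < s → s < t → (prefMin W).getD (s - 1) 0 ≤ W.getD s 0) := by
  induction t with
  | zero => omega
  | succ t ih =>
    rcases Nat.eq_or_lt_of_le h1 with h1' | h1'
    · -- base case t + 1 = 1
      have ht0 : t = 0 := by omega
      subst ht0
      refine ⟨0, ?_, by omega, by omega, prefMin_getD_zero W hW, by omega⟩
      rw [show ((0 + 1 : Nat) : Int) = 1 by rfl, PySem.List.pyRange_one_eq_nil (by omega), List.foldl_nil]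
      obtain ⟨w, tl, rfl⟩ : ∃ w tl, W = w :: tl := by
        cases W with
        | nil => exact absurd rfl hW
        | cons w tl => exact ⟨w, tl, rfl⟩
      have hn1 : (w :: tl).length = tl.length + 1 := by simp
      have hP : PySem.List.pySetD (List.replicate (w :: tl).length (none : Option Int)) 0
          (some (PySem.List.pyGetD (w :: tl) 0 0))
          = ((prefMin (w :: tl)).take (0 + 1)).map some
            ++ List.replicate ((w :: tl).length - (0 + 1)) none := by
        rw [PySem.List.pySetD_of_nonneg _ _ (by omega), PySem.List.pyGetD_zero_cons, hn1,
          List.replicate_succ]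
        rw [show ((0 : Int)).toNat = 0 by rfl, List.set_cons_zero]
        have htake : (prefMin (w :: tl)).take (0 + 1) = [w] := by
          rw [prefMin]
          show (scanMin ((w :: tl).headD 0) (w :: tl)).take 1 = [w]
          simp [scanMin]
        rw [htake]
        simp
      have hS : PySem.List.pySetD (List.replicate (w :: tl).length (none : Option Int)) (-1)
          (some (PySem.List.pyGetD (w :: tl) (-1) 0))
          = List.replicate ((w :: tl).length - (0 + 1)) none
            ++ ((sufMin (w :: tl)).drop ((w :: tl).length - (0 + 1))).map some := by
        rw [PySem.List.pyGetD_neg_one _ _ hW, show (-1 : Int) = -((1 : Nat) : Int) by rfl,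
          pySetD_neg _ 1 _ (by omega) (by simp)]
        simp only [List.length_replicate]
        have hrep : List.replicate (w :: tl).length (none : Option Int)
            = List.replicate ((w :: tl).length - 1 + 1) none := by
          congr 1
        rw [hrep, replicate_set_last]
        have hlen : (w :: tl).length - 1 < (sufMin (w :: tl)).length := by
          rw [length_sufMin]; simp
        have hdrop : (sufMin (w :: tl)).drop ((w :: tl).length - (0 + 1))
            = [(sufMin (w :: tl)).getD ((w :: tl).length - 1) 0] := by
          rw [show (w :: tl).length - (0 + 1) = (w :: tl).length - 1 by omega]
          rw [List.drop_eq_getElem_cons hlen]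
          have hnil : (sufMin (w :: tl)).drop ((w :: tl).length - 1 + 1) = [] := by
            apply List.drop_eq_nil_of_le
            rw [length_sufMin]; omega
          rw [hnil, List.getD_eq_getElem _ 0 hlen]
        rw [hdrop, sufMin_getD_last _ hW]
        have hlast : (w :: tl).getLast hW = (w :: tl).getD ((w :: tl).length - 1) 0 := by
          rw [List.getLast_eq_getElem]
          rw [List.getD_eq_getElem _ 0 (by simp)]
          rfl
        rw [hlast]
        simp
      rw [hP, hS]
    · -- step case: t ≥ 1
      obtain ⟨m, hfold, hm0, hmt, hmeq, hnodec⟩ := ih (by omega) (by omega)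
      set n := W.length with hn
      have hlenp : (prefMin W).length = n := length_prefMin W
      have hlens : (sufMin W).length = n := length_sufMin W
      have hcast : ((t + 1 : Nat) : Int) = (t : Int) + 1 := by push_cast; ring
      rw [hcast, PySem.List.pyRange_one_succ_right (by omega), List.foldl_append, List.foldl_cons,
        List.foldl_nil, hfold]
      -- evaluate one buildStep
      have hreadP : PySem.List.pyGetD
          (((prefMin W).take t).map some ++ List.replicate (n - t) none) ((t : Int) - 1) none
          = some ((prefMin W).getD (t - 1) 0) := by
        have : ((t : Int) - 1) = ((t - 1 : Nat) : Int) := by omega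
        rw [this, pyGetD_mapsome_take _ _ t (t - 1) (by omega) (by omega)]
      have hreadW : PySem.List.pyGetD W ((t : Int)) 0 = W.getD t 0 := by
        rw [PySem.List.pyGetD_eq_getElem _ _ (by omega) (by omega),
          List.getD_eq_getElem W 0 (by omega)]
        simp
      have hvalP : infMin (some ((prefMin W).getD (t - 1) 0)) (W.getD t 0) = (prefMin W).getD t 0 := by
        have hrec := prefMin_getD_succ W (t - 1) (by omega)
        have : t - 1 + 1 = t := by omega
        rw [this] at hrec
        rw [infMin, hrec]
      have hreadS : PySem.List.pyGetD
          (List.replicate (n - t) (none : Option Int) ++ ((sufMin W).drop (n - t)).map some)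
          (-(t : Int)) none = some ((sufMin W).getD (n - t) 0) := by
        rw [PySem.List.pyGetD_neg_natCast _ t none (by omega) (by simp only [List.length_append, List.length_replicate, List.length_map, List.length_drop, hlens]; omega)]
        have hlen2 : (List.replicate (n - t) (none : Option Int)).length = n - t := by simp
        have hlen3 : (List.replicate (n - t) (none : Option Int)
            ++ ((sufMin W).drop (n - t)).map some).length = n := by simp only [List.length_append, List.length_replicate, List.length_map, List.length_drop, hlens]; omega
        rw [List.getElem_append_right (by simp <;> omega)]
        simp only [List.length_replicate, List.getElem_map, List.getElem_drop]
        rw [List.getD_eq_getElem _ 0 (by omega)]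
        congr 2
        omega
      have hreadW2 : PySem.List.pyGetD W (-((t : Int) + 1)) 0 = W.getD (n - (t + 1)) 0 := by
        have : -((t : Int) + 1) = -(((t + 1 : Nat) : Int)) := by push_cast; ring
        rw [this, PySem.List.pyGetD_neg_natCast _ (t + 1) 0 (by omega) (by omega),
          List.getD_eq_getElem W 0 (by omega)]
      have hvalS : infMin (some ((sufMin W).getD (n - t) 0)) (W.getD (n - (t + 1)) 0)
          = (sufMin W).getD (n - (t + 1)) 0 := by
        have hrec := sufMin_getD_succ W (n - (t + 1)) (by omega)
        have : n - (t + 1) + 1 = n - t := by omega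
        rw [this] at hrec
        rw [infMin, hrec, min_comm]
      -- the updated prefix list
      have hsetP : PySem.List.pySetD
          (((prefMin W).take t).map some ++ List.replicate (n - t) none) ((t : Int))
          (some ((prefMin W).getD t 0))
          = ((prefMin W).take (t + 1)).map some ++ List.replicate (n - (t + 1)) none := by
        rw [PySem.List.pySetD_of_nonneg _ _ (by omega)]
        have hlen4 : (((prefMin W).take t).map some).length = t := by simp; omega
        rw [show ((t : Int)).toNat = t by omega]
        rw [List.set_append_right _ _ (by omega)]
        rw [hlen4]
        have hrepl : List.replicate (n - t) (none : Option Int)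
            = (none : Option Int) :: List.replicate (n - (t + 1)) none := by
          rw [← List.replicate_succ]; congr 1; omega
        rw [hrepl]
        simp only [Nat.sub_self, List.set_cons_zero]
        rw [List.take_add_one]
        have : (prefMin W)[t]? = some ((prefMin W).getD t 0) := by
          rw [List.getD_eq_getElem _ 0 (by omega), List.getElem?_eq_getElem (by omega)]
        rw [this]
        simp
      -- the updated suffix list
      have hsetS : PySem.List.pySetD
          (List.replicate (n - t) (none : Option Int) ++ ((sufMin W).drop (n - t)).map some)
          (-((t : Int) + 1)) (some ((sufMin W).getD (n - (t + 1)) 0))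
          = List.replicate (n - (t + 1)) none ++ ((sufMin W).drop (n - (t + 1))).map some := by
        have : -((t : Int) + 1) = -(((t + 1 : Nat) : Int)) := by push_cast; ring
        rw [this, pySetD_neg _ (t + 1) _ (by omega) (by simp only [List.length_append, List.length_replicate, List.length_map, List.length_drop, hlens]; omega)]
        have hlen5 : (List.replicate (n - t) (none : Option Int)
            ++ ((sufMin W).drop (n - t)).map some).length = n := by simp only [List.length_append, List.length_replicate, List.length_map, List.length_drop, hlens]; omega
        rw [hlen5]
        rw [List.set_append_left _ _ (by simp <;> omega)]
        have hrepl : List.replicate (n - t) (none : Option Int)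
            = List.replicate (n - (t + 1) + 1) none := by congr 1; omega
        rw [hrepl, replicate_set_last]
        rw [List.append_assoc]
        congr 1
        have hd : (sufMin W).drop (n - (t + 1))
            = (sufMin W).getD (n - (t + 1)) 0 :: (sufMin W).drop (n - (t + 1) + 1) := by
          rw [List.getD_eq_getElem _ 0 (by omega)]
          rw [List.drop_eq_getElem_cons (by omega)]
        rw [hd]
        have hnt : n - (t + 1) + 1 = n - t := by omega
        rw [hnt]
        simp
      -- read from the updated prefix list (entries below t are unchanged)
      have hreadP' : PySem.List.pyGetD
          (((prefMin W).take (t + 1)).map some ++ List.replicate (n - (t + 1)) none)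
          ((t : Int) - 1) none = some ((prefMin W).getD (t - 1) 0) := by
        have hcast2 : ((t : Int) - 1) = ((t - 1 : Nat) : Int) := by omega
        rw [hcast2, pyGetD_mapsome_take _ _ (t + 1) (t - 1) (by omega) (by omega)]
      have hstep : buildStep W
            (((prefMin W).take t).map some ++ List.replicate (n - t) none,
             List.replicate (n - t) none ++ ((sufMin W).drop (n - t)).map some, m) ((t : Int))
          = (((prefMin W).take (t + 1)).map some ++ List.replicate (n - (t + 1)) none,
             List.replicate (n - (t + 1)) none ++ ((sufMin W).drop (n - (t + 1))).map some,
             if W.getD t 0 < (prefMin W).getD (t - 1) 0 then (t : Int) else m) := by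
        simp only [buildStep]
        rw [hreadP, hreadW, hvalP, hsetP, hreadS, hreadW2, hvalS, hsetS, hreadP']
        simp only [infGt]
        by_cases hcond : W.getD t 0 < (prefMin W).getD (t - 1) 0
        · rw [if_pos (by simpa using hcond), if_pos hcond]
        · rw [if_neg (by simpa using hcond), if_neg hcond]
      rw [hstep]
      by_cases hcond : W.getD t 0 < (prefMin W).getD (t - 1) 0
      · refine ⟨(t : Int), ?_, by omega, by omega, ?_, ?_⟩
        · rw [if_pos hcond]
        · have hrec := prefMin_getD_succ W (t - 1) (by omega)
          have htt : t - 1 + 1 = t := by omega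
          rw [htt] at hrec
          rw [show ((t : Int)).toNat = t by omega, hrec]
          omega
        · intro s hs1 hs2
          rw [show ((t : Int)).toNat = t by omega] at hs1
          omega
      · refine ⟨m, ?_, hm0, by omega, hmeq, ?_⟩
        · rw [if_neg hcond]
        · intro s hs1 hs2
          rcases Nat.lt_or_ge s t with hst | hst
          · exact hnodec s hs1 hst
          · have hseq : s = t := by omega
            subst hseq
            omega

-- ---- A's main loop equals the two-stream greedy ----

lemma pyGetD_mapsome (MPl : List Int) (i : Int) (h0 : 0 ≤ i) (h1 : i < (MPl.length : Int)) :
    PySem.List.pyGetD (MPl.map some) i none = some (MPl.getD i.toNat 0) := by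
  rw [PySem.List.pyGetD_eq_getElem _ _ h0 (by simp; omega), List.getElem_map,
    List.getD_eq_getElem _ 0 (by omega)]

lemma reverse_take_succ (MPl : List Int) (k : Nat) (hk : k < MPl.length) :
    (MPl.take (k + 1)).reverse = MPl.getD k 0 :: (MPl.take k).reverse := by
  rw [List.take_add_one, List.getElem?_eq_getElem hk, List.getD_eq_getElem _ 0 hk]
  simp

lemma drop_eq_getD_cons (MSl : List Int) (k : Nat) (hk : k < MSl.length) :
    MSl.drop k = MSl.getD k 0 :: MSl.drop (k + 1) := by
  rw [List.getD_eq_getElem _ 0 hk]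
  exact List.drop_eq_getElem_cons hk

lemma skipL_spec (MPl : List Int) (b : Int) (i : Int) (hi : -1 ≤ i) (hi2 : i < (MPl.length : Int)) :
    -1 ≤ skipL (MPl.map some) b i ∧ skipL (MPl.map some) b i ≤ i ∧
    ((MPl.take ((skipL (MPl.map some) b i) + 1).toNat).reverse
       = ((MPl.take (i + 1).toNat).reverse).dropWhile (fun x => decide (x < b))) ∧
    (0 ≤ skipL (MPl.map some) b i → b ≤ MPl.getD (skipL (MPl.map some) b i).toNat 0) := by
  suffices H : ∀ (k : Nat) (i : Int), -1 ≤ i → i < (MPl.length : Int) → (i + 1).toNat = k →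
      -1 ≤ skipL (MPl.map some) b i ∧ skipL (MPl.map some) b i ≤ i ∧
      ((MPl.take ((skipL (MPl.map some) b i) + 1).toNat).reverse
        = ((MPl.take (i + 1).toNat).reverse).dropWhile (fun x => decide (x < b))) ∧
      (0 ≤ skipL (MPl.map some) b i → b ≤ MPl.getD (skipL (MPl.map some) b i).toNat 0) by
    exact H (i + 1).toNat i hi hi2 rfl
  intro k
  induction k using Nat.strong_induction_on with
  | _ k ihk =>
  intro i hi hi2 hk
  rw [skipL]
  by_cases hg : 0 ≤ i ∧ gtInf b (PySem.List.pyGetD (MPl.map some) i none) = true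
  · obtain ⟨h0, hgt⟩ := hg
    rw [pyGetD_mapsome MPl i h0 hi2] at hgt
    have hlt : MPl.getD i.toNat 0 < b := by simpa [gtInf] using hgt
    rw [dif_pos ⟨h0, by rw [pyGetD_mapsome MPl i h0 hi2]; simpa [gtInf] using hlt⟩]
    obtain ⟨c1, c2, c3, c4⟩ := ihk ((i - 1) + 1).toNat (by omega) (i - 1) (by omega) (by omega) rfl
    refine ⟨by omega, by omega, ?_, c4⟩
    rw [c3]
    have h1 : (i + 1).toNat = i.toNat + 1 := by omega
    rw [h1, reverse_take_succ MPl i.toNat (by omega)]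
    rw [List.dropWhile_cons_of_pos (by simpa using hlt)]
    rw [show (i - 1 + 1).toNat = i.toNat from by omega]
  · rw [dif_neg hg]
    refine ⟨hi, le_refl i, ?_, ?_⟩
    · rcases Int.lt_or_le i 0 with hneg | hpos
      · have : (i + 1).toNat = 0 := by omega
        rw [this]
        simp
      · have hgt : ¬ (MPl.getD i.toNat 0 < b) := by
          intro hlt
          exact hg ⟨hpos, by rw [pyGetD_mapsome MPl i hpos hi2]; simpa [gtInf] using hlt⟩
        have h1 : (i + 1).toNat = i.toNat + 1 := by omega
        rw [h1, reverse_take_succ MPl i.toNat (by omega)]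
        rw [List.dropWhile_cons_of_neg (by simpa using hgt)]
    · intro h0
      have hgt : ¬ (MPl.getD i.toNat 0 < b) := by
        intro hlt
        exact hg ⟨h0, by rw [pyGetD_mapsome MPl i h0 hi2]; simpa [gtInf] using hlt⟩
      omega

lemma skipR_spec (MSl : List Int) (n b : Int) (j : Int) (hn : n = (MSl.length : Int))
    (hj : 0 ≤ j) (hj2 : j ≤ n) :
    j ≤ skipR (MSl.map some) n b j ∧ skipR (MSl.map some) n b j ≤ n ∧
    (MSl.drop (skipR (MSl.map some) n b j).toNat
       = (MSl.drop j.toNat).dropWhile (fun x => decide (x < b))) ∧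
    (skipR (MSl.map some) n b j < n → b ≤ MSl.getD (skipR (MSl.map some) n b j).toNat 0) := by
  subst hn
  suffices H : ∀ (k : Nat) (j : Int), 0 ≤ j → j ≤ (MSl.length : Int) → ((MSl.length : Int) - j).toNat = k →
      j ≤ skipR (MSl.map some) (MSl.length : Int) b j ∧
      skipR (MSl.map some) (MSl.length : Int) b j ≤ (MSl.length : Int) ∧
      (MSl.drop (skipR (MSl.map some) (MSl.length : Int) b j).toNat
        = (MSl.drop j.toNat).dropWhile (fun x => decide (x < b))) ∧
      (skipR (MSl.map some) (MSl.length : Int) b j < (MSl.length : Int) →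
        b ≤ MSl.getD (skipR (MSl.map some) (MSl.length : Int) b j).toNat 0) by
    exact H ((MSl.length : Int) - j).toNat j hj hj2 rfl
  intro k
  induction k using Nat.strong_induction_on with
  | _ k ihk =>
  intro j hj hj2 hk
  rw [skipR]
  by_cases hg : j < (MSl.length : Int) ∧ gtInf b (PySem.List.pyGetD (MSl.map some) j none) = true
  · obtain ⟨h0, hgt⟩ := hg
    rw [pyGetD_mapsome MSl j hj h0] at hgt
    have hlt : MSl.getD j.toNat 0 < b := by simpa [gtInf] using hgt
    rw [dif_pos ⟨h0, by rw [pyGetD_mapsome MSl j hj h0]; simpa [gtInf] using hlt⟩]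
    obtain ⟨c1, c2, c3, c4⟩ := ihk ((MSl.length : Int) - (j + 1)).toNat (by omega) (j + 1) (by omega) (by omega) rfl
    refine ⟨by omega, c2, ?_, c4⟩
    rw [c3]
    have h1 : (j + 1).toNat = j.toNat + 1 := by omega
    rw [h1, drop_eq_getD_cons MSl j.toNat (by omega)]
    rw [List.dropWhile_cons_of_pos (by simpa using hlt)]
  · rw [dif_neg hg]
    refine ⟨le_refl j, ?_, ?_, ?_⟩
    · rcases Int.lt_or_le j (MSl.length : Int) with hlt | hge
      · have hgt : ¬ (MSl.getD j.toNat 0 < b) := by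
          intro hl
          exact hg ⟨hlt, by rw [pyGetD_mapsome MSl j hj hlt]; simpa [gtInf] using hl⟩
        omega
      · omega
    · rcases Int.lt_or_le j (MSl.length : Int) with hlt | hge
      · have hgt : ¬ (MSl.getD j.toNat 0 < b) := by
          intro hl
          exact hg ⟨hlt, by rw [pyGetD_mapsome MSl j hj hlt]; simpa [gtInf] using hl⟩
        rw [drop_eq_getD_cons MSl j.toNat (by omega)]
        rw [List.dropWhile_cons_of_neg (by simpa using hgt)]
      · have : MSl.drop j.toNat = [] := List.drop_eq_nil_of_le (by omega)
        rw [this]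
        simp
    · intro hlt
      have hgt : ¬ (MSl.getD j.toNat 0 < b) := by
        intro hl
        exact hg ⟨hlt, by rw [pyGetD_mapsome MSl j hj hlt]; simpa [gtInf] using hl⟩
      omega

lemma pyTupMin_inf_L (x : Int) (t : Option Bool) :
    pyTupMin (none, none) (some x, t) = (some x, t) := by
  rw [pyTupMin, if_pos (by simp [fstLt])]

lemma pyTupMin_LR (x y : Int) :
    pyTupMin (some x, some true) (some y, some false)
      = if y ≤ x then (some y, some false) else (some x, some true) := by
  by_cases h1 : y < x
  · rw [pyTupMin, if_pos (by simp [fstLt]; omega), if_pos (by omega)]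
  · rw [pyTupMin, if_neg (by simp [fstLt]; omega)]
    by_cases h2 : y = x
    · subst h2
      rw [if_pos ⟨rfl, by simp [sndLt]⟩, if_pos (by omega)]
    · rw [if_neg (by simp [sndLt]; omega), if_neg (by omega)]

lemma loopA_eq (MPl MSl : List Int) (hlen : MSl.length = MPl.length) (bs : List Int)
    (ans i j : Int) (hi : -1 ≤ i) (hi2 : i < (MPl.length : Int)) (hj : 0 ≤ j)
    (hj2 : j ≤ (MPl.length : Int)) :
    loopA (MPl.map some) (MSl.map some) (MPl.length : Int) bs ans i j
      = ans + twoGreedy bs ((MPl.take (i + 1).toNat).reverse) (MSl.drop j.toNat) := by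
  induction bs generalizing ans i j with
  | nil => rw [loopA, twoGreedy]; ring
  | cons b bs ih =>
    obtain ⟨l1, l2, l3, l4⟩ := skipL_spec MPl b i hi hi2
    obtain ⟨r1, r2, r3, r4⟩ := skipR_spec MSl (MPl.length : Int) b j (by rw [hlen]) hj hj2
    rw [loopA]
    set i' := skipL (MPl.map some) b i with hi'def
    set j' := skipR (MSl.map some) (MPl.length : Int) b j with hj'def
    rw [twoGreedy, ← l3, ← r3]
    by_cases h0i : 0 ≤ i'
    · have hxval := pyGetD_mapsome MPl i' h0i (by omega)
      rw [if_pos h0i, hxval]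
      have hiL : (MPl.take (i' + 1).toNat).reverse
          = MPl.getD i'.toNat 0 :: (MPl.take i'.toNat).reverse := by
        rw [show (i' + 1).toNat = i'.toNat + 1 from by omega,
          reverse_take_succ MPl i'.toNat (by omega)]
      by_cases h0j : j' < (MPl.length : Int)
      · have hyval := pyGetD_mapsome MSl j' (by omega) (by rw [← hlen] at h0j; exact h0j)
        rw [if_pos h0j, hyval, pyTupMin_inf_L, pyTupMin_LR]
        have hjR : MSl.drop j'.toNat = MSl.getD j'.toNat 0 :: MSl.drop (j'.toNat + 1) := by
          rw [drop_eq_getD_cons MSl j'.toNat (by omega)]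
        rw [hiL, hjR]
        by_cases hyx : MSl.getD j'.toNat 0 ≤ MPl.getD i'.toNat 0
        · rw [if_pos hyx]
          show loopA (MPl.map some) (MSl.map some) (MPl.length : Int) bs (ans + 1) i' (j' + 1)
            = ans + (if MSl.getD j'.toNat 0 ≤ MPl.getD i'.toNat 0 then
                1 + twoGreedy bs (MPl.getD i'.toNat 0 :: (MPl.take i'.toNat).reverse) (MSl.drop (j'.toNat + 1))
              else 1 + twoGreedy bs (MPl.take i'.toNat).reverse (MSl.getD j'.toNat 0 :: MSl.drop (j'.toNat + 1)))
          rw [if_pos hyx, ih (ans + 1) i' (j' + 1) (by omega) (by omega) (by omega) (by omega)]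
          rw [show (j' + 1).toNat = j'.toNat + 1 from by omega, hiL]
          omega
        · rw [if_neg hyx]
          show loopA (MPl.map some) (MSl.map some) (MPl.length : Int) bs (ans + 1) (i' - 1) j'
            = ans + (if MSl.getD j'.toNat 0 ≤ MPl.getD i'.toNat 0 then
                1 + twoGreedy bs (MPl.getD i'.toNat 0 :: (MPl.take i'.toNat).reverse) (MSl.drop (j'.toNat + 1))
              else 1 + twoGreedy bs (MPl.take i'.toNat).reverse (MSl.getD j'.toNat 0 :: MSl.drop (j'.toNat + 1)))
          rw [if_neg hyx, ih (ans + 1) (i' - 1) j' (by omega) (by omega) (by omega) (by omega)]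
          rw [show (i' - 1 + 1).toNat = i'.toNat from by omega, ← hjR]
          omega
      · rw [if_neg h0j, pyTupMin_inf_L]
        have hjR : MSl.drop j'.toNat = [] := by
          apply List.drop_eq_nil_of_le
          omega
        rw [hiL, hjR]
        show loopA (MPl.map some) (MSl.map some) (MPl.length : Int) bs (ans + 1) (i' - 1) j'
          = ans + (1 + twoGreedy bs (MPl.take i'.toNat).reverse [])
        rw [ih (ans + 1) (i' - 1) j' (by omega) (by omega) (by omega) (by omega)]
        rw [show (i' - 1 + 1).toNat = i'.toNat from by omega, hjR]
        omega
    · have hiL : (MPl.take (i' + 1).toNat).reverse = [] := by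
        rw [show (i' + 1).toNat = 0 from by omega]
        simp
      rw [if_neg h0i]
      by_cases h0j : j' < (MPl.length : Int)
      · have hyval := pyGetD_mapsome MSl j' (by omega) (by rw [← hlen] at h0j; exact h0j)
        rw [if_pos h0j, hyval, pyTupMin_inf_L]
        have hjR : MSl.drop j'.toNat = MSl.getD j'.toNat 0 :: MSl.drop (j'.toNat + 1) := by
          rw [drop_eq_getD_cons MSl j'.toNat (by omega)]
        rw [hiL, hjR]
        show loopA (MPl.map some) (MSl.map some) (MPl.length : Int) bs (ans + 1) i' (j' + 1)
          = ans + (1 + twoGreedy bs [] (MSl.drop (j'.toNat + 1)))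
        rw [ih (ans + 1) i' (j' + 1) (by omega) (by omega) (by omega) (by omega)]
        rw [show (j' + 1).toNat = j'.toNat + 1 from by omega, hiL]
        omega
      · rw [if_neg h0j]
        have hjR : MSl.drop j'.toNat = [] := by
          apply List.drop_eq_nil_of_le
          omega
        rw [hiL, hjR]
        show ans = ans + 0
        omega

-- ---- assembling the equivalence ----

lemma getLast_eq_reverse_headD (l : List Int) (h : l ≠ []) : l.getLast h = l.reverse.headD 0 := by
  rw [List.getLast_eq_head_reverse]
  have h2 : l.reverse ≠ [] := by simpa using h
  rw [List.headD_eq_head?, List.head?_eq_some_head h2]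
  rfl

lemma prefMin_const_after (W : List Int) (m : Nat) (hm : m < W.length)
    (hnodec : ∀ s : Nat, m < s → s < W.length → (prefMin W).getD (s - 1) 0 ≤ W.getD s 0) :
    ∀ s : Nat, m ≤ s → s < W.length → (prefMin W).getD s 0 = (prefMin W).getD m 0 := by
  intro s
  induction s with
  | zero =>
    intro hms _
    have h0 : m = 0 := by omega
    subst h0
    rfl
  | succ s ihs =>
    intro hms hsn
    rcases Nat.eq_or_lt_of_le hms with heq | hlt
    · rw [← heq]
    · have hrec := prefMin_getD_succ W s (by omega)
      have hle := hnodec (s + 1) (by omega) (by omega)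
      rw [show s + 1 - 1 = s from rfl] at hle
      rw [hrec, min_eq_left hle, ihs (by omega) (by omega)]

lemma zip_split (W : List Int) (m : Nat) (hm : m < W.length)
    (hmeq : (prefMin W).getD m 0 = W.getD m 0)
    (hnodec : ∀ s : Nat, m < s → s < W.length → (prefMin W).getD (s - 1) 0 ≤ W.getD s 0) :
    List.zipWith max (prefMin W) (sufMin W)
      = (prefMin W).take (m + 1) ++ (sufMin W).drop (m + 1) := by
  have hlp := length_prefMin W
  have hls := length_sufMin W
  have hconst := prefMin_const_after W m hm hnodec
  have hgmin : ∀ t : Nat, t < W.length → W.getD m 0 ≤ W.getD t 0 := by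
    intro t htn
    rcases Nat.lt_or_ge m t with hmt | htm
    · calc W.getD m 0 = (prefMin W).getD m 0 := hmeq.symm
        _ = (prefMin W).getD (t - 1) 0 := (hconst (t - 1) (by omega) (by omega)).symm
        _ ≤ W.getD t 0 := hnodec t hmt htn
    · calc W.getD m 0 = (prefMin W).getD m 0 := hmeq.symm
        _ ≤ (prefMin W).getD t 0 := prefMin_anti W t m htm hm
        _ ≤ W.getD t 0 := prefMin_le_self W t htn
  apply List.ext_getElem
  · simp only [List.length_zipWith, List.length_append, List.length_take, List.length_drop,
      hlp, hls]
    omega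
  · intro i h1 h2
    rw [List.getElem_zipWith]
    by_cases him : i < m + 1
    · rw [List.getElem_append_left (by simp only [List.length_take, hlp]; omega)]
      rw [List.getElem_take]
      have hle : (sufMin W).getD i 0 ≤ (prefMin W).getD i 0 := by
        calc (sufMin W).getD i 0 ≤ (sufMin W).getD m 0 :=
              sufMin_mono W i m (by omega) (by omega)
          _ ≤ W.getD m 0 := sufMin_le_self W m (by omega)
          _ = (prefMin W).getD m 0 := hmeq.symm
          _ ≤ (prefMin W).getD i 0 := prefMin_anti W i m (by omega) hm
      rw [List.getD_eq_getElem _ 0 (by omega), List.getD_eq_getElem _ 0 (by omega)] at hle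
      exact max_eq_left hle
    · rw [List.getElem_append_right (by simp only [List.length_take, hlp]; omega)]
      rw [List.getElem_drop]
      have hidx : m + 1 + (i - ((prefMin W).take (m + 1)).length) = i := by
        simp only [List.length_take, hlp]
        omega
      have hin : i < W.length := by
        simp only [List.length_zipWith, hlp, hls] at h1
        omega
      have hge : (prefMin W).getD i 0 ≤ (sufMin W).getD i 0 := by
        have h3 : (prefMin W).getD i 0 = W.getD m 0 := by
          rw [hconst i (by omega) (by omega), hmeq]
        rw [h3]
        apply sufMin_lb W (W.getD m 0) ?_ ((sufMin W).getD i 0) ?_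
        · intro y hy
          obtain ⟨t, ht, rfl⟩ := List.mem_iff_getElem.1 hy
          rw [← List.getD_eq_getElem W 0 ht]
          exact hgmin t ht
        · rw [List.getD_eq_getElem _ 0 (by omega)]
          exact List.getElem_mem _
      have hi2 : i < (prefMin W).length := by omega
      have hi3 : i < (sufMin W).length := by omega
      rw [List.getD_eq_getElem _ 0 hi2, List.getD_eq_getElem _ 0 hi3] at hge
      have hgoal : (sufMin W)[m + 1 + (i - (List.take (m + 1) (prefMin W)).length)]'(by
          simp only [List.length_take, hlp, hls]; omega) = (sufMin W)[i]'(by omega) := by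
        congr 1
      rw [hgoal]
      exact max_eq_right hge

-- ===== VERDICT (by name: the statement is the Claim_ definition above) =====
theorem maxBoxesInWarehouse_spec : Claim_equal_maxBoxesInWarehouse := by
  intro boxes W _hdom hpre
  have hW : W ≠ [] := hpre
  have hn1 : 1 ≤ W.length := List.length_pos_of_ne_nil hW
  have hlp : (prefMin W).length = W.length := length_prefMin W
  have hls : (sufMin W).length = W.length := length_sufMin W
  show maxBoxesInWarehouse boxes W = maxBoxesInWarehouse_alt boxes W
  obtain ⟨m, hfold, hm0, hmt, hmeq, hnodec⟩ := build_inv W hW W.length hn1 (le_refl _)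
  rw [Nat.sub_self] at hfold
  simp only [List.replicate_zero, List.append_nil, List.nil_append, List.drop_zero,
    List.take_of_length_le (le_of_eq hlp)] at hfold
  set sb := PySem.List.sorted boxes (fun x => x) false with hsb
  have hA : maxBoxesInWarehouse boxes W
      = loopA ((prefMin W).map some) ((sufMin W).map some) (W.length : Int) sb 0 m (m + 1) := by
    simp only [maxBoxesInWarehouse]
    rw [hfold]
  have hloopAeq := loopA_eq (prefMin W) (sufMin W) (by rw [hlp, hls]) sb 0 m (m + 1)
    (by omega) (by rw [hlp]; omega) (by omega) (by rw [hlp]; omega)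
  rw [hlp] at hloopAeq
  have hmn : (m + 1).toNat = m.toNat + 1 := by omega
  rw [hmn] at hloopAeq
  have hB : maxBoxesInWarehouse_alt boxes W
      = oneGreedy sb (PySem.List.sorted (List.zipWith max (prefMin W) (sufMin W)) (fun x => x) false) := by
    simp only [maxBoxesInWarehouse_alt]
    rw [foldl_scanStep W (PySem.List.pyGetD W 0 0) [],
      foldl_scanStep W.reverse (PySem.List.pyGetD W (-1) 0) []]
    simp only [List.nil_append]
    have h00 : PySem.List.pyGetD W 0 0 = W.headD 0 := by
      cases W with
      | nil => rfl
      | cons a t => rw [PySem.List.pyGetD_zero_cons]; rfl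
    have h11 : PySem.List.pyGetD W (-1) 0 = W.reverse.headD 0 := by
      rw [PySem.List.pyGetD_neg_one _ _ hW]
      exact getLast_eq_reverse_headD W hW
    rw [h00, h11, reverse_scanMin_reverse, show scanMin (W.headD 0) W = prefMin W from rfl]
    rw [foldl_countStep sb _ 0 (by omega) (by omega)]
    rw [show ((0 : Int)).toNat = 0 from rfl, List.drop_zero]
    omega
  have hLpair : (((prefMin W).take (m.toNat + 1)).reverse).Pairwise (· ≤ ·) := by
    rw [List.pairwise_reverse]
    exact List.Pairwise.sublist (List.take_sublist _ _) (scanMin_pairwise _ _)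
  have hRpair : ((sufMin W).drop (m.toNat + 1)).Pairwise (· ≤ ·) :=
    List.Pairwise.sublist (List.drop_sublist _ _) (sufMin_pairwise W)
  have hsplit := zip_split W m.toNat (by omega) hmeq hnodec
  have hperm : (mergeLR (((prefMin W).take (m.toNat + 1)).reverse)
      ((sufMin W).drop (m.toNat + 1))).Perm (List.zipWith max (prefMin W) (sufMin W)) := by
    refine (mergeLR_perm _ _).trans ?_
    rw [hsplit]
    exact List.Perm.append_right _ (List.reverse_perm _)
  have heff := PySem.List.sorted_id_eq_of_perm_of_pairwise
    (List.zipWith max (prefMin W) (sufMin W))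
    (mergeLR (((prefMin W).take (m.toNat + 1)).reverse) ((sufMin W).drop (m.toNat + 1)))
    hperm (mergeLR_pairwise _ _ hLpair hRpair)
  rw [hA, hloopAeq, twoGreedy_eq_oneGreedy, hB, heff]
  omega
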